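-- pv_equiv track=rewrite | github.com/dscepop/fafl | 4.py | is_valid_string
-- ===== SOURCE A (Python) =====
-- def is_valid_string(input_str):
--     stack = []
--     i = 0
--     n = len(input_str)
--
--     # Push all leading '0's onto the stack
--     while i < n and input_str[i] == '0':
--         stack.append('0')
--         i += 1
--
--     # Pop '0's for each '1'
--     while i < n and input_str[i] == '1':
--         if not stack:  # Stack is empty (no matching '0')
--             return False
--         stack.pop()
--         i += 1
--
--     # String is valid if we processed all characters and stack is empty
--     return i == n and not stack
-- ===== SOURCE B (Python) =====
-- def is_valid_string(input_str):
--     half, rem = divmod(len(input_str), 2)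
--     return rem == 0 and all(c == '0' for c in input_str[:half]) and all(c == '1' for c in input_str[half:])
-- ===== Notes on version B (the rewrite author's own statement) =====
-- stated objective: simpler
-- what changed: Replaces the stack push/pop scan by a split at the midpoint: the length must be even, the first half all zeros, the second half all ones.
import Mathlib
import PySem

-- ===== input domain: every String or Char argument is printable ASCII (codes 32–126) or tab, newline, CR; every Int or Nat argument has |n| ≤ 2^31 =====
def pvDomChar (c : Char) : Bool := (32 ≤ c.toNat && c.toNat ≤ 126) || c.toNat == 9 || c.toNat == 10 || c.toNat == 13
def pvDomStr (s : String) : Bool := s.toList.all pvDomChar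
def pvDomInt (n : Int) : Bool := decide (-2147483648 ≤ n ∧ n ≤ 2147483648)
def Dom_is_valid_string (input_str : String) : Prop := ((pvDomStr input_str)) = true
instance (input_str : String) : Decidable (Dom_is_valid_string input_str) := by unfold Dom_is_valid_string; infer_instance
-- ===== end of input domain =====

-- B replaces A's stack push/pop scan by a midpoint split (even length, first half zeros, second half ones); objective: simpler.

-- ===== PORT A =====
-- first while loop: push all leading '0's onto the stack, advancing i (rest = suffix from i)
def pvA_push (stack : List Char) : List Char → List Char × List Char
  | [] => (stack, [])
  | c :: rest => if c == '0' then pvA_push ('0' :: stack) rest else (stack, c :: rest)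

-- second while loop: pop a '0' for each '1'; early `return False` on empty stack;
-- on loop exit, `return i == n and not stack` (a remaining non-'1' char means i < n, hence false)
def pvA_pop (stack : List Char) : List Char → Bool
  | [] => stack.isEmpty
  | c :: rest =>
      if c == '1' then
        match stack with
        | [] => false
        | _ :: s => pvA_pop s rest
      else false

def is_valid_string (input_str : String) : Bool :=
  let r := pvA_push [] input_str.toList
  pvA_pop r.1 r.2

-- ===== PORT B =====
-- Source B: half, rem = divmod(len(input_str), 2); the slices input_str[:half] / input_str[half:]
-- (0 ≤ half ≤ n) are List.take / List.drop; the two all(...) iterate the characters directly.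
def is_valid_string_alt (input_str : String) : Bool :=
  let l := input_str.toList
  let half := l.length / 2
  let rem := l.length % 2
  rem == 0 && (l.take half).all (fun c => c == '0') && (l.drop half).all (fun c => c == '1')

-- ===== PRECONDITION & SPEC =====
def Spec_is_valid_string (input_str : String) (out : Bool) : Prop := out = is_valid_string_alt input_str
instance (input_str : String) (out : Bool) : Decidable (Spec_is_valid_string input_str out) := by unfold Spec_is_valid_string; infer_instance

-- ===== CLAIM (what is proved, stated in full; the proofs are below) =====
def Claim_equal_is_valid_string : Prop := ∀ (input_str : String), Dom_is_valid_string input_str → Spec_is_valid_string input_str (is_valid_string input_str)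

-- ===== LEMMAS AND PROOFS =====

theorem pvA_push_eq (l : List Char) : ∀ st, pvA_push st l =
    (List.replicate (l.takeWhile (fun c => c == '0')).length '0' ++ st,
     l.dropWhile (fun c => c == '0')) := by
  induction l with
  | nil => intro st; simp [pvA_push]
  | cons c rest ih =>
    intro st
    by_cases h : c = '0'
    · simp [pvA_push, h, ih, List.replicate_succ', List.append_assoc]
    · simp [pvA_push, h]

theorem pvA_pop_eq (rest : List Char) : ∀ st, pvA_pop st rest =
    decide (rest = List.replicate st.length '1') := by
  induction rest with
  | nil => intro st; cases st <;> simp [pvA_pop]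
  | cons c r ih =>
    intro st
    by_cases h : c = '1'
    · cases st with
      | nil => simp [pvA_pop, h]
      | cons x s => simp [pvA_pop, h, ih, List.replicate_succ]
    · cases st with
      | nil => simp [pvA_pop, h]
      | cons x s => simp [pvA_pop, h, List.replicate_succ]

-- takeWhile (· == '0') is a list of '0's
theorem takeWhile_zero_eq_replicate (l : List Char) :
    l.takeWhile (fun c => c == '0') =
      List.replicate (l.takeWhile (fun c => c == '0')).length '0' := by
  induction l with
  | nil => simp
  | cons c rest ih =>
    by_cases h : c = '0'
    · simp [h, List.replicate_succ, ← ih]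
    · simp [h]

theorem takeWhile_rep_rep (j k : Nat) :
    (List.replicate j '0' ++ List.replicate k '1').takeWhile (fun c => c == '0') =
      List.replicate j '0' := by
  induction j with
  | zero =>
    cases k with
    | zero => simp
    | succ m => simp [List.replicate_succ]
  | succ m ih => simp [List.replicate_succ, ih]

theorem dropWhile_rep_rep (j k : Nat) :
    (List.replicate j '0' ++ List.replicate k '1').dropWhile (fun c => c == '0') =
      List.replicate k '1' := by
  induction j with
  | zero =>
    cases k with
    | zero => simp
    | succ m => simp [List.replicate_succ]
  | succ m ih => simp [List.replicate_succ, ih]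

-- A is true exactly on 0^k 1^k
theorem A_iff (s : String) : is_valid_string s = true ↔
    ∃ k, s.toList = List.replicate k '0' ++ List.replicate k '1' := by
  unfold is_valid_string
  rw [pvA_push_eq, pvA_pop_eq]
  simp only [List.append_nil, List.length_replicate, decide_eq_true_eq]
  constructor
  · intro h
    refine ⟨(s.toList.takeWhile (fun c => c == '0')).length, ?_⟩
    conv_lhs => rw [← List.takeWhile_append_dropWhile (p := fun c => c == '0') (l := s.toList)]
    rw [h, takeWhile_zero_eq_replicate]
    simp
  · rintro ⟨k, hk⟩
    rw [hk, takeWhile_rep_rep, dropWhile_rep_rep]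
    simp
-- B is true exactly on 0^k 1^k
theorem B_iff (s : String) : is_valid_string_alt s = true ↔
    ∃ k, s.toList = List.replicate k '0' ++ List.replicate k '1' := by
  unfold is_valid_string_alt
  simp only [Bool.and_eq_true, beq_iff_eq, List.all_eq_true]
  constructor
  · rintro ⟨⟨hrem, h0⟩, h1⟩
    refine ⟨s.toList.length / 2, ?_⟩
    have hhalf : s.toList.length / 2 ≤ s.toList.length := Nat.div_le_self _ _
    have ht : s.toList.take (s.toList.length / 2) =
        List.replicate (s.toList.length / 2) '0' := by
      rw [List.eq_replicate_iff]
      refine ⟨?_, h0⟩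
      rw [List.length_take]
      omega
    have hd : s.toList.drop (s.toList.length / 2) =
        List.replicate (s.toList.length / 2) '1' := by
      rw [List.eq_replicate_iff]
      refine ⟨?_, h1⟩
      rw [List.length_drop]
      omega
    conv_lhs => rw [← List.take_append_drop (s.toList.length / 2) s.toList]
    rw [ht, hd]
  · rintro ⟨k, hk⟩
    have hlen : s.toList.length = 2 * k := by simp [hk]; omega
    have hhalf : s.toList.length / 2 = k := by omega
    refine ⟨⟨by omega, ?_⟩, ?_⟩
    · intro c hc
      rw [hhalf, hk] at hc
      rw [List.take_append_of_le_length (by simp)] at hc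
      simp at hc
      exact hc.2
    · intro c hc
      rw [hhalf, hk] at hc
      rw [List.drop_append_of_le_length (by simp)] at hc
      simp at hc
      exact hc.2

-- ===== VERDICT (by name: the statement is the Claim_ definition above) =====
theorem is_valid_string_spec : Claim_equal_is_valid_string := by
  intro s _
  unfold Spec_is_valid_string
  have := (A_iff s).trans (B_iff s).symm
  cases hA : is_valid_string s <;> cases hB : is_valid_string_alt s <;> simp_all
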